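-- pv_equiv track=rewrite | github.com/Tosh0kan/Team_Name_Generator | Team Name Generator.py | find_combs
-- ===== SOURCE A (Python) =====
-- def find_combs(members, current_members=[""]):
--     relevant, output = members[0], []
--     for m in relevant:
--         for cm in current_members:
--             output.append(cm + m)
--
--     # If there is more than 1 member, repeat the process for everything beyond this member
--     if (len(members) > 1):
--         output = find_combs(members[1:], output)
--     return output
-- ===== SOURCE B (Python) =====
-- def find_combs(members, current_members=[""]):
--     output = current_members
--     for group in members:
--         output = [cm + m for m in group for cm in output]
--     return output
-- ===== Notes on version B (the rewrite author's own statement) =====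
-- stated objective: simpler
-- what changed: Replaces the tail recursion with slicing (members[1:]) and nested append loops by a single left-fold loop that rebuilds the output with one flat comprehension per group.
-- outside the precondition, e.g. on find_combs([], ['x']): A raises IndexError, B returns ['x']
-- crash fix: On empty members A raises IndexError (it reads members[0] before any length check); B naturally returns current_members unchanged. — e.g. on find_combs([], ["x"]): A raises IndexError, B returns ["x"]
import Mathlib
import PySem

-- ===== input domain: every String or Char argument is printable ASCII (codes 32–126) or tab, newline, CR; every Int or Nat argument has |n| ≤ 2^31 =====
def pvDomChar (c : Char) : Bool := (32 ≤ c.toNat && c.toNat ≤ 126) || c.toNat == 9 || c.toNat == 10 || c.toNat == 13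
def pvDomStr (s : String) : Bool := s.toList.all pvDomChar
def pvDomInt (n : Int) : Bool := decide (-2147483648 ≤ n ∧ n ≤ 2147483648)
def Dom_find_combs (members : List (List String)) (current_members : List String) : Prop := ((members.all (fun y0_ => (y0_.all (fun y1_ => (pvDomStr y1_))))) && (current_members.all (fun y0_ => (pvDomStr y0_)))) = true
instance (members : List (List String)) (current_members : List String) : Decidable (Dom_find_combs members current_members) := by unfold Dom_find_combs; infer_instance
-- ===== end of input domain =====

-- B replaces A's recursion-with-slicing and nested append loops by a single left fold
-- building each stage with one flatMap; on empty `members` A raises IndexError, B returns `current_members`.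


-- ===== PORT A =====
def find_combs (members : List (List String)) (current_members : List String) : List String :=
  match members with
  | [] => []  -- `members[0]` raises IndexError here; excluded by Pre_find_combs
  | relevant :: rest =>
    -- output = []; for m in relevant: for cm in current_members: output.append(cm + m)
    let output := relevant.foldl
      (fun acc m => current_members.foldl (fun acc2 cm => acc2 ++ [cm ++ m]) acc) []
    if rest.length > 0 then find_combs rest output else output

-- ===== PORT B =====
def find_combs_alt (members : List (List String)) (current_members : List String) : List String :=
  members.foldl (fun output group => group.flatMap (fun m => output.map (fun cm => cm ++ m)))
    current_members

-- ===== PRECONDITION & SPEC =====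
-- Pre_ excludes exactly the empty `members`, on which A raises IndexError (members[0]).
def Pre_find_combs (members : List (List String)) (current_members : List String) : Prop :=
  members ≠ []
instance (members : List (List String)) (current_members : List String) : Decidable (Pre_find_combs members current_members) := by unfold Pre_find_combs; infer_instance
def pvWitness_find_combs : List (List String) × List String := ([["a", "b"], ["c"]], [""])

-- On empty `members` A raises IndexError (it reads members[0] before any length check); B returns current_members unchanged.
def Raises_find_combs (members : List (List String)) (current_members : List String) : Prop :=
  members = []
instance (members : List (List String)) (current_members : List String) : Decidable (Raises_find_combs members current_members) := by unfold Raises_find_combs; infer_instance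
def pvRaiseWitness_find_combs : List (List String) × List String := ([], ["x"])
def pvRaiseWitnessOut_find_combs : List String := ["x"]

def Spec_find_combs (members : List (List String)) (current_members : List String) (out : List String) : Prop := out = find_combs_alt members current_members
instance (members : List (List String)) (current_members : List String) (out : List String) : Decidable (Spec_find_combs members current_members out) := by unfold Spec_find_combs; infer_instance

-- ===== CLAIM (what is proved, stated in full; the proofs are below) =====
def Claim_equal_find_combs : Prop := ∀ (members : List (List String)) (current_members : List String), Dom_find_combs members current_members → Pre_find_combs members current_members → Spec_find_combs members current_members (find_combs members current_members)
def Claim_raises_find_combs : Prop := (∀ (members : List (List String)) (current_members : List String), Dom_find_combs members current_members → Raises_find_combs members current_members → ¬ Pre_find_combs members current_members) ∧ (Dom_find_combs (pvRaiseWitness_find_combs.1) (pvRaiseWitness_find_combs.2) ∧ Raises_find_combs (pvRaiseWitness_find_combs.1) (pvRaiseWitness_find_combs.2) ∧ find_combs_alt (pvRaiseWitness_find_combs.1) (pvRaiseWitness_find_combs.2) = pvRaiseWitnessOut_find_combs)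

-- ===== LEMMAS AND PROOFS =====

-- One stage of A's nested append loops equals B's flatMap/map stage.
theorem find_combs_step (relevant : List String) (cur : List String) :
    relevant.foldl (fun acc m => cur.foldl (fun acc2 cm => acc2 ++ [cm ++ m]) acc) [] =
      relevant.flatMap (fun m => cur.map (fun cm => cm ++ m)) := by
  simp only [PySem.List.foldl_append_singleton_eq_map,
    PySem.List.foldl_append_eq_flatMap, List.nil_append]

theorem find_combs_eq_foldl (members : List (List String)) (cur : List String)
    (h : members ≠ []) : find_combs members cur = find_combs_alt members cur := by
  induction members generalizing cur with
  | nil => exact absurd rfl h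
  | cons g rest ih =>
    unfold find_combs
    simp only [find_combs_step]
    cases rest with
    | nil => simp [find_combs_alt]
    | cons r rs =>
      simp only [List.length_cons, if_pos (Nat.succ_pos _)]
      rw [ih _ (by simp)]
      simp only [find_combs_alt, List.foldl_cons]

-- ===== VERDICT (by name: the statement is the Claim_ definition above) =====
theorem find_combs_spec : Claim_equal_find_combs := by
  intro members cur _ hpre
  exact find_combs_eq_foldl members cur hpre

theorem find_combs_raises : Claim_raises_find_combs := by
  unfold Claim_raises_find_combs
  exact ⟨fun m c _ hr hp => hp hr, by decide⟩

-- self-check that the raise witness lies inside Raises_ (uses find_combs_raises)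
theorem find_combs_raise_witness_ok :
    Raises_find_combs (pvRaiseWitness_find_combs.1) (pvRaiseWitness_find_combs.2) := by
  have h := find_combs_raises
  unfold Claim_raises_find_combs at h
  exact h.2.2.1
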